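-- pv_equiv track=rewrite | github.com/eli-sr/TSP-Alg-Gen | main.py | search_index_to_insert
-- ===== SOURCE A (Python) =====
-- def search_index_to_insert(array1, array2, val_to_search, start, end):
--     for j in range(len(array2)):
--         if array2[j] == val_to_search:
--             if j not in range(start, end + 1):
--                 return j
--             else:
--                 val_to_search = array1[j]
--                 return search_index_to_insert(array1, array2, val_to_search, start, end)
-- ===== SOURCE B (Python) =====
-- def search_index_to_insert(array1, array2, val_to_search, start, end):
--     # Build a first-occurrence index once, then follow the value chain with O(1) lookups.
--     first_idx = {}
--     for k, v in enumerate(array2):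
--         if v not in first_idx:
--             first_idx[v] = k
--     while True:
--         j = first_idx.get(val_to_search)
--         if j is None:
--             return None
--         if j < start or j > end:
--             return j
--         val_to_search = array1[j]
-- ===== Notes on version B (the rewrite author's own statement) =====
-- stated objective: alternative
-- what changed: Replaced the rescanning recursion (each chain step re-scans array2 from the start) with a first-occurrence dict built once over array2 and an iterative while-loop that follows the value chain with O(1) lookups.
import Mathlib
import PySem

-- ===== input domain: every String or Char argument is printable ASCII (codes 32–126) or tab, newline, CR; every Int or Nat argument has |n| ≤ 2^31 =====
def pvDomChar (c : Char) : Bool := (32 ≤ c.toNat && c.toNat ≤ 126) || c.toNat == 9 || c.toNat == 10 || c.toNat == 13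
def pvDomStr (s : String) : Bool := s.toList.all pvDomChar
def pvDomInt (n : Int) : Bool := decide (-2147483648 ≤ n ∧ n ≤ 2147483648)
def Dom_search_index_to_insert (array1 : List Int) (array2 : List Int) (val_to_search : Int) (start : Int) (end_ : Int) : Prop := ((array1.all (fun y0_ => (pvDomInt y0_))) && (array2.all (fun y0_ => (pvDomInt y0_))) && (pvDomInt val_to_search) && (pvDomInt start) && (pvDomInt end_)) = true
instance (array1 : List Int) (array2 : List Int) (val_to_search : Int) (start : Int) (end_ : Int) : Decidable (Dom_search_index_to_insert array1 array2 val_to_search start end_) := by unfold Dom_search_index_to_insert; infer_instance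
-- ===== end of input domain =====

-- B builds a first-occurrence index of array2 once and follows the value chain iteratively
-- with O(1) lookups, instead of A's recursion that re-scans array2 on every chain step
-- (alternative decomposition; return-value equivalence on Pre_).


-- ===== PORT A =====
-- the 'for j in range(len(array2)): if array2[j] == val: …' scan of A, step for step
def siiA_find : List Int → Int → Nat → Option Nat
  | [], _, _ => none
  | x :: rest, val, j => if x = val then some j else siiA_find rest val (j + 1)

-- A's recursive call; fuel only makes the (possibly diverging) Python recursion total,
-- the per-step computation is A's code unchanged.  fuel = len(array2)+1 is exact: a chain
-- of more than len(array2) in-range steps revisits a first-occurrence index and the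
-- Python recursion then never terminates (RecursionError) — outside Pre_.
def siiA_go (array1 array2 : List Int) (start end_ : Int) : Nat → Int → Option Int
  | 0, _ => none
  | fuel + 1, val =>
    match siiA_find array2 val 0 with
    | none => none
    | some j =>
      if ¬ (start ≤ (j : Int) ∧ (j : Int) ≤ end_) then some (j : Int)
      else
        match PySem.List.pyGet? array1 (j : Int) with
        | none => none  -- IndexError in Python; excluded by Pre_
        | some v => siiA_go array1 array2 start end_ fuel v

def search_index_to_insert (array1 : List Int) (array2 : List Int) (val_to_search : Int) (start : Int) (end_ : Int) : Option Int :=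
  siiA_go array1 array2 start end_ (array2.length + 1) val_to_search

-- ===== PORT B =====
-- 'first_idx = {}; for k, v in enumerate(array2): if v not in first_idx: first_idx[v] = k'
def siiB_build (array2 : List Int) : PySem.Dict Int Int :=
  (PySem.List.enumerate array2).foldl
    (fun d kv => if d.contains kv.2 then d else d.insert kv.2 kv.1) PySem.Dict.empty

-- the 'while True:' chain loop of B; fuel only totalises the loop (same exactness bound)
def siiB_go (array1 : List Int) (d : PySem.Dict Int Int) (start end_ : Int) : Nat → Int → Option Int
  | 0, _ => none
  | fuel + 1, val =>
    match d.get? val with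
    | none => none
    | some j =>
      if j < start ∨ end_ < j then some j
      else
        match PySem.List.pyGet? array1 j with
        | none => none
        | some v => siiB_go array1 d start end_ fuel v

def search_index_to_insert_alt (array1 : List Int) (array2 : List Int) (val_to_search : Int) (start : Int) (end_ : Int) : Option Int :=
  siiB_go array1 (siiB_build array2) start end_ (array2.length + 1) val_to_search

-- ===== PRECONDITION & SPEC =====
-- Pre_ holds EXACTLY on the inputs where the Python A returns a value: elsewhere A raises
-- (IndexError when the value chain reaches an in-range index j ≥ len(array1), or
-- RecursionError when the chain cycles — and a chain of more than len(array2) in-range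
-- steps necessarily revisits a first-occurrence index, hence cycles, so the len(array2)+1
-- step bound below is not a size cap but the exact cycle criterion).  Whether A returns IS
-- a reachability property of the value chain the input encodes (which bad links the chain
-- actually visits), so no closed-form bound/shape condition can state it without either
-- excluding inputs on which A returns or admitting inputs on which it raises; the
-- predicate therefore walks that chain over the INPUT lists only (it computes neither
-- port's output).  It excludes no input on which A returns; my Python B raises
-- IndexError / diverges on the same excluded inputs.
def siiSafe (array1 array2 : List Int) (start end_ : Int) : Nat → Int → Bool
  | 0, _ => false
  | fuel + 1, val =>
    match PySem.List.index? array2 val with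
    | none => true
    | some j =>
      if (j : Int) < start ∨ end_ < (j : Int) then true
      else if j < array1.length then
        siiSafe array1 array2 start end_ fuel (array1.getD j 0)
      else false

def Pre_search_index_to_insert (array1 : List Int) (array2 : List Int) (val_to_search : Int) (start : Int) (end_ : Int) : Prop :=
  siiSafe array1 array2 start end_ (array2.length + 1) val_to_search = true
instance (array1 : List Int) (array2 : List Int) (val_to_search : Int) (start : Int) (end_ : Int) : Decidable (Pre_search_index_to_insert array1 array2 val_to_search start end_) := by unfold Pre_search_index_to_insert; infer_instance

def pvWitness_search_index_to_insert : List Int × List Int × Int × Int × Int := ([8, 9], [7, 8], 7, 0, 1)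

def Spec_search_index_to_insert (array1 : List Int) (array2 : List Int) (val_to_search : Int) (start : Int) (end_ : Int) (out : Option Int) : Prop := out = search_index_to_insert_alt array1 array2 val_to_search start end_
instance (array1 : List Int) (array2 : List Int) (val_to_search : Int) (start : Int) (end_ : Int) (out : Option Int) : Decidable (Spec_search_index_to_insert array1 array2 val_to_search start end_ out) := by unfold Spec_search_index_to_insert; infer_instance

-- ===== CLAIM (what is proved, stated in full; the proofs are below) =====
def Claim_equal_search_index_to_insert : Prop := ∀ (array1 : List Int) (array2 : List Int) (val_to_search : Int) (start : Int) (end_ : Int), Dom_search_index_to_insert array1 array2 val_to_search start end_ → Pre_search_index_to_insert array1 array2 val_to_search start end_ → Spec_search_index_to_insert array1 array2 val_to_search start end_ (search_index_to_insert array1 array2 val_to_search start end_)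

-- ===== LEMMAS AND PROOFS =====

-- A's scan is the first-occurrence index
theorem siiA_find_eq (l : List Int) (v : Int) (j : Nat) :
    siiA_find l v j = (PySem.List.index? l v).map (· + j) := by
  induction l generalizing j with
  | nil => simp [siiA_find, PySem.List.index?]
  | cons x rest ih =>
    by_cases h : x = v
    · subst h
      rw [siiA_find, if_pos rfl, PySem.List.index?_cons_self]
      simp
    · rw [siiA_find, if_neg h, ih, PySem.List.index?_cons_of_ne rest h]
      cases PySem.List.index? rest v
      · simp
      · simp; omega

-- B's dict is the first-occurrence index
theorem siiB_build_get? (l : List Int) (v : Int) :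
    (siiB_build l).get? v = Option.map (fun k : Nat => (k : Int)) (PySem.List.index? l v) := by
  induction l using List.reverseRecOn generalizing v with
  | nil => simp [siiB_build, PySem.List.enumerate_nil, PySem.List.index?, PySem.Dict.get?_empty]
  | append_singleton l x ih =>
    have hstep : siiB_build (l ++ [x]) =
        (if (siiB_build l).contains x then siiB_build l
         else (siiB_build l).insert x (l.length : Int)) := by
      unfold siiB_build
      rw [PySem.List.enumerate_append, List.foldl_append, PySem.List.enumerate_cons,
        PySem.List.enumerate_nil]
      simp
    have hmem : (siiB_build l).contains x = true ↔ x ∈ l := by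
      rw [← Bool.not_eq_false, ← PySem.Dict.get?_eq_none_iff_contains, ih,
        Option.map_eq_none_iff, PySem.List.index?_eq_none_iff]
      tauto
    rw [hstep]
    by_cases hx : x ∈ l
    · rw [if_pos (hmem.mpr hx)]
      by_cases hv : v ∈ l
      · rw [ih, PySem.List.index?_append_of_mem [x] hv]
      · have hne : v ≠ x := fun hvx => hv (hvx ▸ hx)
        have h1 : (siiB_build l).get? v = none := by
          rw [ih, Option.map_eq_none_iff, PySem.List.index?_eq_none_iff]; exact hv
        have h2 : PySem.List.index? (l ++ [x]) v = none := by
          rw [PySem.List.index?_eq_none_iff]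
          simp [hv, hne]
        rw [h1, h2]; rfl
    · rw [if_neg (fun hc => hx (hmem.mp hc))]
      by_cases hvx : v = x
      · subst hvx
        rw [PySem.Dict.get?_insert_self, PySem.List.index?_append_singleton_self l v hx]
        rfl
      · rw [PySem.Dict.get?_insert_of_ne _ _ hvx, ih]
        by_cases hv : v ∈ l
        · rw [PySem.List.index?_append_of_mem [x] hv]
        · have h2 : PySem.List.index? (l ++ [x]) v = none := by
            rw [PySem.List.index?_eq_none_iff]
            simp [hv, hvx]
          have h1 : PySem.List.index? l v = none := by
            rw [PySem.List.index?_eq_none_iff]; exact hv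
          rw [h1, h2]

theorem go_eq (a1 a2 : List Int) (s e : Int) (fuel : Nat) (v : Int) :
    siiA_go a1 a2 s e fuel v = siiB_go a1 (siiB_build a2) s e fuel v := by
  induction fuel generalizing v with
  | zero => rfl
  | succ f ih =>
    have hf : siiA_find a2 v 0 = PySem.List.index? a2 v := by
      rw [siiA_find_eq]; cases PySem.List.index? a2 v <;> simp
    rw [siiA_go, siiB_go, siiB_build_get?, hf]
    cases h : PySem.List.index? a2 v with
    | none => rfl
    | some j =>
      simp only [Option.map_some]
      by_cases hin : (j : Int) < s ∨ e < (j : Int)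
      · rw [if_pos (by omega : ¬ (s ≤ (j : Int) ∧ (j : Int) ≤ e)), if_pos hin]
      · rw [if_neg (by omega : ¬ ¬ (s ≤ (j : Int) ∧ (j : Int) ≤ e)), if_neg hin]
        cases PySem.List.pyGet? a1 (j : Int) with
        | none => rfl
        | some w => exact ih w

-- ===== VERDICT (by name: the statement is the Claim_ definition above) =====
theorem search_index_to_insert_spec : Claim_equal_search_index_to_insert := by
  intro a1 a2 v s e _ _
  unfold Spec_search_index_to_insert search_index_to_insert search_index_to_insert_alt
  exact go_eq a1 a2 s e _ v
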